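-- pv_equiv track=rewrite | github.com/malleshamdasari/Relation-Extraction | hotvector_generator.py | cleaning
-- ===== SOURCE A (Python) =====
-- Person_tag = "_TYPE_PERSON"
--
-- Time_tag = "_TYPE_TIME"
--
-- Oragnization_tag ="_TYPE_ORGANIZATION"
--
-- def cleaning(ATypes, A):
--     if "," in ATypes:
--         A1_Types_comma = ATypes.split(",")
--         for type in A1_Types_comma:
--             A1_Types_colon = type.split(":")
--             for colon in A1_Types_colon:
--                 if "person" in colon:
--                     A = Person_tag
--                 if "time_unit" in colon:
--                     A = Time_tag
--                 # if "number" in colon: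
--                 #     A = Number_tag
--                 if "organization" in colon:
--                     A = Oragnization_tag
--     else:
--             A1_Types_colon = ATypes.split(":")
--             for colon in A1_Types_colon:
--                 if "person" in colon:
--                     A = Person_tag
--                 if "time_unit" in colon:
--                     A = Time_tag
--                 # if "number" in colon:
--                 #     A = Number_tag
--                 if "organization" in colon:
--                     A = Oragnization_tag
--     return A
-- ===== SOURCE B (Python) =====
-- Person_tag = "_TYPE_PERSON"
--
-- Time_tag = "_TYPE_TIME"
--
-- Oragnization_tag = "_TYPE_ORGANIZATION"
--
-- def cleaning(ATypes, A):
--     # Flatten once on both separators, then scan the tokens back-to-front,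
--     # returning at the first (i.e. last-in-original-order) tagged token with
--     # the original within-token precedence organization > time_unit > person.
--     tokens = [t for part in ATypes.split(",") for t in part.split(":")]
--     for token in reversed(tokens):
--         if "organization" in token:
--             return Oragnization_tag
--         if "time_unit" in token:
--             return Time_tag
--         if "person" in token:
--             return Person_tag
--     return A
-- ===== Notes on version B (the rewrite author's own statement) =====
-- stated objective: simpler
-- what changed: Replaces A's duplicated comma/no-comma branches with two-level nested accumulate-and-overwrite loops by a single flatten of the tokens over both separators followed by one back-to-front scan that returns at the first tagged token (precedence organization > time_unit > person), with no accumulator and no branch duplication.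
import Mathlib
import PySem

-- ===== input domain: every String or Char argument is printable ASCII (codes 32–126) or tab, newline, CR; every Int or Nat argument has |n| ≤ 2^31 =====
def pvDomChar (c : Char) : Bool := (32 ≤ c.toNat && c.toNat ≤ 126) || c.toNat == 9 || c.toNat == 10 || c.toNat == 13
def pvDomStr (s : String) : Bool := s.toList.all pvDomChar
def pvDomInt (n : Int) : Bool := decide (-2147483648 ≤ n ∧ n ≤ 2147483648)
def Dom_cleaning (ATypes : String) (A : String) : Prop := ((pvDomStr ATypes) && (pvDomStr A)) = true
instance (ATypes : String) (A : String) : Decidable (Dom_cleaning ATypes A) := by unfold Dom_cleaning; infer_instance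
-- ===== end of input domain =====

-- B replaces A's comma/no-comma branch with two structurally identical nested loops by one
-- flatten of the tokens followed by a back-to-front early-return scan (objective: simpler).

def Person_tag : String := "_TYPE_PERSON"
def Time_tag : String := "_TYPE_TIME"
def Oragnization_tag : String := "_TYPE_ORGANIZATION"

-- ===== PORT A =====
def cleaning (ATypes : String) (A : String) : String :=
  let T := ATypes.toList
  if PySem.Chars.isIn [','] T then
    (PySem.Chars.splitOn T [',']).foldl (fun a ty =>
      (PySem.Chars.splitOn ty [':']).foldl (fun a colon =>
        let a := if PySem.Chars.isIn "person".toList colon then Person_tag else a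
        let a := if PySem.Chars.isIn "time_unit".toList colon then Time_tag else a
        if PySem.Chars.isIn "organization".toList colon then Oragnization_tag else a) a) A
  else
    (PySem.Chars.splitOn T [':']).foldl (fun a colon =>
      let a := if PySem.Chars.isIn "person".toList colon then Person_tag else a
      let a := if PySem.Chars.isIn "time_unit".toList colon then Time_tag else a
      if PySem.Chars.isIn "organization".toList colon then Oragnization_tag else a) A

-- ===== PORT B =====
def pvTagScan : List (List Char) → String → String
  | [], A => A
  | t :: rest, A =>
    if PySem.Chars.isIn "organization".toList t then Oragnization_tag
    else if PySem.Chars.isIn "time_unit".toList t then Time_tag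
    else if PySem.Chars.isIn "person".toList t then Person_tag
    else pvTagScan rest A

def cleaning_alt (ATypes : String) (A : String) : String :=
  let tokens := (PySem.Chars.splitOn ATypes.toList [',']).flatMap
    (fun part => PySem.Chars.splitOn part [':'])
  pvTagScan tokens.reverse A

-- ===== PRECONDITION & SPEC =====
def Spec_cleaning (ATypes : String) (A : String) (out : String) : Prop := out = cleaning_alt ATypes A
instance (ATypes : String) (A : String) (out : String) : Decidable (Spec_cleaning ATypes A out) := by unfold Spec_cleaning; infer_instance

-- ===== CLAIM (what is proved, stated in full; the proofs are below) =====
def Claim_equal_cleaning : Prop := ∀ (ATypes : String) (A : String), Dom_cleaning ATypes A → Spec_cleaning ATypes A (cleaning ATypes A)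

-- ===== LEMMAS AND PROOFS =====

-- the tag (if any) a single token produces, with A's within-token precedence
def pvTag (t : List Char) : Option String :=
  if PySem.Chars.isIn "organization".toList t then some Oragnization_tag
  else if PySem.Chars.isIn "time_unit".toList t then some Time_tag
  else if PySem.Chars.isIn "person".toList t then some Person_tag
  else none

theorem step_eq_tag (a : String) (colon : List Char) :
    (let a' := if PySem.Chars.isIn "person".toList colon then Person_tag else a
     let a'' := if PySem.Chars.isIn "time_unit".toList colon then Time_tag else a'
     if PySem.Chars.isIn "organization".toList colon then Oragnization_tag else a'')
    = (pvTag colon).getD a := by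
  unfold pvTag; split_ifs <;> simp_all

theorem pvTagScan_append (xs : List (List Char)) (t : List Char) (A : String) :
    pvTagScan (xs ++ [t]) A = pvTagScan xs ((pvTag t).getD A) := by
  induction xs with
  | nil => simp only [List.nil_append, pvTagScan, pvTag]; split_ifs <;> simp_all
  | cons x xs ih => simp only [List.cons_append, pvTagScan, ih]

theorem foldl_eq_scan (l : List (List Char)) (A : String) :
    l.foldl (fun a t => (pvTag t).getD a) A = pvTagScan l.reverse A := by
  induction l generalizing A with
  | nil => rfl
  | cons t l ih => simp only [List.foldl_cons, List.reverse_cons, ih, pvTagScan_append]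

theorem splitOn_go_no_sep (fuel : Nat) (l cur : List Char) (acc : List (List Char))
    (h : ',' ∉ l) :
    PySem.Chars.splitOn.go [','] fuel l cur acc = acc.reverse ++ [cur.reverse ++ l] := by
  induction fuel generalizing l cur acc with
  | zero => simp [PySem.Chars.splitOn.go]
  | succ fuel ih =>
    cases l with
    | nil => simp [PySem.Chars.splitOn.go]
    | cons c rest =>
      have hc : c ≠ ',' := fun hc => h (hc ▸ List.mem_cons_self)
      have hp : [','].isPrefixOf (c :: rest) = false := by
        simp [List.isPrefixOf, Ne.symm hc]
      rw [PySem.Chars.splitOn.go, if_neg (by simp [hp])]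
      rw [ih rest (c :: cur) acc (fun hm => h (List.mem_cons_of_mem _ hm))]
      simp

theorem splitOn_no_sep (T : List Char) (h : PySem.Chars.isIn [','] T = false) :
    PySem.Chars.splitOn T [','] = [T] := by
  have hmem : ',' ∉ T := by
    intro hm
    rw [PySem.Chars.isIn_eq_false_iff] at h
    rcases List.append_of_mem hm with ⟨pre, suf, rfl⟩
    exact h ⟨pre, suf, by simp⟩
  unfold PySem.Chars.splitOn
  rw [splitOn_go_no_sep _ _ _ _ hmem]
  simp

-- ===== VERDICT (by name: the statement is the Claim_ definition above) =====
theorem cleaning_spec : Claim_equal_cleaning := by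
  intro ATypes A _
  show cleaning ATypes A = cleaning_alt ATypes A
  unfold cleaning cleaning_alt
  simp only [step_eq_tag]
  rw [← List.foldl_flatMap, foldl_eq_scan]
  split_ifs with h
  · rfl
  · rw [splitOn_no_sep _ (by simpa using h), foldl_eq_scan]
    simp
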